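-- pv_equiv track=rewrite | github.com/liuchuo/PAT | PTA_MOOC_Python/src03.py | data_process
-- ===== SOURCE A (Python) =====
-- def data_process(a):
--     ans = []
--     d = dict()
--     a = a.split()
--     del a[0]
--     for i in range(int(len(a) / 2)):
--         ans.append([a[2 * i], a[2 * i + 1]])
--         d[str(a[2 * i + 1])] = a[2 * i]
--     return ans, d
-- ===== SOURCE B (Python) =====
-- def _pairs(toks):
--     if len(toks) < 2:
--         return []
--     return [[toks[0], toks[1]]] + _pairs(toks[2:])
--
--
-- def data_process(a):
--     toks = a.split()[1:]
--     ans = _pairs(toks)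
--     d = {}
--     for x, y in ans:
--         d[y] = x
--     return ans, d
-- ===== Notes on version B (the rewrite author's own statement) =====
-- stated objective: simpler
-- what changed: Two-phase decomposition: B first builds the pair list by structural recursion on consecutive tokens (no index arithmetic), then derives the dict in a second pass over the already-built pairs, instead of A's single fused index loop over range(len//2).
import Mathlib
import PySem

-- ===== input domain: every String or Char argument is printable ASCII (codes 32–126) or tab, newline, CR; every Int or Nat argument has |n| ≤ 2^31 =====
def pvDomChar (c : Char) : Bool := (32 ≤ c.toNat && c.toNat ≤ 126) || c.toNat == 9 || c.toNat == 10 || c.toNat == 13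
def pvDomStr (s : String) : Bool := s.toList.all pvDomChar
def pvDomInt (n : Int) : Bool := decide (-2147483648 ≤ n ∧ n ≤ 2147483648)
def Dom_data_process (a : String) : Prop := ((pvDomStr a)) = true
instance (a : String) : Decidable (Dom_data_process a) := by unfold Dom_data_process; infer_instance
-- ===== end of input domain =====

-- B replaces A's fused index loop over range(len//2) by a two-phase decomposition:
-- structural pairing of consecutive tokens, then a second pass over the pairs to build the dict.

-- ===== PORT A =====
def data_process (a : String) : List (List String) × (List (String × String)) :=
  let toks := PySem.Str.split₀ a
  -- `del a[0]`: removes the first token; raises IndexError iff toks = [] (excluded by Pre_)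
  let rest := toks.drop 1
  -- int(len(a) / 2) = len // 2 for a nonnegative length
  let res :=
    (PySem.List.pyRange 0 (rest.length / 2 : Nat) 1).foldl
      (fun (acc : List (List String) × PySem.Dict String String) i =>
        (acc.1 ++ [[PySem.List.pyGetD rest (2 * i) "", PySem.List.pyGetD rest (2 * i + 1) ""]],
         acc.2.insert (PySem.List.pyGetD rest (2 * i + 1) "") (PySem.List.pyGetD rest (2 * i) "")))
      ([], PySem.Dict.empty)
  (res.1, res.2.items)

-- ===== PORT B =====
-- _pairs: structural recursion pairing consecutive tokens
def pairsB : List String → List (List String)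
  | x :: y :: rest => [x, y] :: pairsB rest
  | _ => []

def data_process_alt (a : String) : List (List String) × (List (String × String)) :=
  let toks := PySem.List.slice (PySem.Str.split₀ a) (some 1) none   -- a.split()[1:]
  let ans := pairsB toks
  let d := ans.foldl
      (fun (d : PySem.Dict String String) p =>
        match p with                      -- `for x, y in ans: d[y] = x` (every element of ans is a pair)
        | [x, y] => d.insert y x
        | _ => d)
      PySem.Dict.empty
  (ans, d.items)

-- ===== PRECONDITION & SPEC =====
-- A raises IndexError (del a[0]) exactly when a.split() is empty, i.e. a is whitespace-only.
def Pre_data_process (a : String) : Prop := PySem.Str.split₀ a ≠ []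
instance (a : String) : Decidable (Pre_data_process a) := by unfold Pre_data_process; infer_instance
def pvWitness_data_process : String := "2 a 1 b 2"

def Spec_data_process (a : String) (out : List (List String) × (List (String × String))) : Prop := out = data_process_alt a
instance (a : String) (out : List (List String) × (List (String × String))) : Decidable (Spec_data_process a out) := by unfold Spec_data_process; infer_instance

-- ===== CLAIM (what is proved, stated in full; the proofs are below) =====
def Claim_equal_data_process : Prop := ∀ (a : String), Dom_data_process a → Pre_data_process a → Spec_data_process a (data_process a)

-- ===== LEMMAS AND PROOFS =====

-- the dict pass of B, as a named step function
def bstep (d : PySem.Dict String String) (p : List String) : PySem.Dict String String :=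
  match p with
  | [x, y] => d.insert y x
  | _ => d

-- core loop equivalence: A's indexed fold over range(len t / 2) computes B's two phases
theorem loop_eq (t : List String) (acc1 : List (List String)) (acc2 : PySem.Dict String String) :
    (List.range (t.length / 2)).foldl
      (fun (acc : List (List String) × PySem.Dict String String) (k : Nat) =>
        (acc.1 ++ [[t.getD (2 * k) "", t.getD (2 * k + 1) ""]],
         acc.2.insert (t.getD (2 * k + 1) "") (t.getD (2 * k) "")))
      (acc1, acc2)
    = (acc1 ++ pairsB t, (pairsB t).foldl bstep acc2) := by
  induction t using pairsB.induct generalizing acc1 acc2 with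
  | case1 x y r ih =>
    have hlen : (x :: y :: r).length / 2 = r.length / 2 + 1 := by
      simp [List.length_cons]; omega
    rw [hlen, List.range_succ_eq_map]
    simp only [List.foldl_cons, List.foldl_map]
    have hfun : (fun (acc : List (List String) × PySem.Dict String String) (k : Nat) =>
        (acc.1 ++ [[(x :: y :: r).getD (2 * (k + 1)) "", (x :: y :: r).getD (2 * (k + 1) + 1) ""]],
         acc.2.insert ((x :: y :: r).getD (2 * (k + 1) + 1) "") ((x :: y :: r).getD (2 * (k + 1)) "")))
        = (fun (acc : List (List String) × PySem.Dict String String) (k : Nat) =>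
        (acc.1 ++ [[r.getD (2 * k) "", r.getD (2 * k + 1) ""]],
         acc.2.insert (r.getD (2 * k + 1) "") (r.getD (2 * k) ""))) := by
      funext acc k
      have h1 : 2 * (k + 1) = (2 * k) + 1 + 1 := by omega
      have h2 : 2 * (k + 1) + 1 = (2 * k + 1) + 1 + 1 := by omega
      rw [h2, h1]
      simp
    simp only [Nat.succ_eq_add_one, hfun]
    have e0 : (x :: y :: r).getD (2 * 0) "" = x := rfl
    have e1 : (x :: y :: r).getD (2 * 0 + 1) "" = y := rfl
    rw [e0, e1, ih (acc1 ++ [[x, y]]) (acc2.insert y x)]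
    simp [pairsB, bstep]
  | case2 t h =>
    match t with
    | [] => simp [pairsB]
    | [x] => simp [pairsB]
    | x :: y :: r => exact absurd rfl (fun hh => h x y r hh)

-- ===== VERDICT (by name: the statement is the Claim_ definition above) =====
theorem data_process_spec : Claim_equal_data_process := by
  intro a _ _
  unfold Spec_data_process data_process data_process_alt
  rw [PySem.List.slice_from_one]
  simp only [PySem.List.pyRange_zero_nat, List.foldl_map]
  have hcast : ∀ (xs : List String) (k : Nat),
      PySem.List.pyGetD xs ((k : Int)) "" = xs.getD k "" := by
    intro xs k; simp [PySem.List.pyGetD_natCast]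
  have hfun : (fun (acc : List (List String) × PySem.Dict String String) (k : Nat) =>
      (acc.1 ++ [[PySem.List.pyGetD ((PySem.Str.split₀ a).drop 1) (2 * (k : Int)) "",
                  PySem.List.pyGetD ((PySem.Str.split₀ a).drop 1) (2 * (k : Int) + 1) ""]],
       acc.2.insert (PySem.List.pyGetD ((PySem.Str.split₀ a).drop 1) (2 * (k : Int) + 1) "")
                    (PySem.List.pyGetD ((PySem.Str.split₀ a).drop 1) (2 * (k : Int)) "")))
      = (fun (acc : List (List String) × PySem.Dict String String) (k : Nat) =>
      (acc.1 ++ [[((PySem.Str.split₀ a).drop 1).getD (2 * k) "",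
                  ((PySem.Str.split₀ a).drop 1).getD (2 * k + 1) ""]],
       acc.2.insert (((PySem.Str.split₀ a).drop 1).getD (2 * k + 1) "")
                    (((PySem.Str.split₀ a).drop 1).getD (2 * k) ""))) := by
    funext acc k
    have h1 : (2 * (k : Int)) = ((2 * k : Nat) : Int) := by push_cast; ring
    have h2 : (2 * (k : Int) + 1) = ((2 * k + 1 : Nat) : Int) := by push_cast; ring
    rw [h2, h1]; simp only [hcast]
  rw [hfun, loop_eq]
  rw [show (PySem.Str.split₀ a).tail = (PySem.Str.split₀ a).drop 1 from List.drop_one.symm]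
  rfl
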